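-- pv_equiv track=rewrite | github.com/coder-brunette/geeks4geeks_google_sde_questions | max_sum_max_subarray.py | max_sum_of_max_subarray
-- ===== SOURCE A (Python) =====
-- def max_sum_of_max_subarray(arr,m,k):
--
--     n = len(arr)
--     dp = [[0]* (n+1) for _ in range(m+1)]
--     prefix_sum = [0] * (n+1)
--
--     for i in range(1,n+1):
--         prefix_sum[i] = prefix_sum[i-1] + arr[i-1]
--
--     for i in range(1,m+1):
--         for j in range(i*k, n+1):
--             dp[i][j] = max(dp[i][j-1], dp[i-1][j-k] + prefix_sum[j] - prefix_sum[j-k])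
--
--     return dp[m][n]
-- ===== SOURCE B (Python) =====
-- def max_sum_of_max_subarray(arr, m, k):
--     # Top-down memoized formulation run on an explicit work stack (no table
--     # fill): f(i, j) = best sum of i non-overlapping length-k windows in the
--     # first j elements, floored at 0; subproblems are computed on demand, only
--     # those reachable from (m, n), with a dict memo.
--     n = len(arr)
--     ps = [0]
--     for x in arr:
--         ps.append(ps[-1] + x)
--     memo = {}
--     stack = [(m, n)]
--     while stack:
--         i, j = stack.pop()
--         if (i, j) in memo:
--             continue
--         if i <= 0 or j < i * k:
--             memo[(i, j)] = 0
--             continue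
--         a = memo.get((i, j - 1))
--         b = memo.get((i - 1, j - k))
--         if a is None or b is None:
--             stack.append((i, j))
--             stack.append((i, j - 1))
--             stack.append((i - 1, j - k))
--             continue
--         take = b + ps[j] - ps[j - k]
--         memo[(i, j)] = a if a > take else take
--     return memo[(m, n)]
-- ===== Notes on version B (the rewrite author's own statement) =====
-- stated objective: faster
-- what changed: Replaces the bottom-up (m+1)x(n+1) table fill with a top-down memoized computation of f(i,j) driven by an explicit work stack and a dict memo, evaluating only the subproblems actually reachable from (m,n).
import Mathlib
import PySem

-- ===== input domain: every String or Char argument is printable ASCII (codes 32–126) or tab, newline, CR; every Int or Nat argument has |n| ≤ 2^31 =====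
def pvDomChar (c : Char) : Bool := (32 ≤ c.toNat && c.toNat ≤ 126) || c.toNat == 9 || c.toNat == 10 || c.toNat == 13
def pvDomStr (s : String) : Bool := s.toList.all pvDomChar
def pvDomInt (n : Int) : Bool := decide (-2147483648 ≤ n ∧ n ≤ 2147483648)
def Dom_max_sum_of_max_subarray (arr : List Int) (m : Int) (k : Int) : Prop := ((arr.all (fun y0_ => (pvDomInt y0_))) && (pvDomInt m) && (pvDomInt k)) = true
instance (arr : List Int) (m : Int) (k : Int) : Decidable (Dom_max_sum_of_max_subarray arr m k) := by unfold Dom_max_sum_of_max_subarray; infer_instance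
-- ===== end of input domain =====

-- B replaces A's bottom-up table fill by a top-down memoized computation of the same
-- optimum, driven by an explicit work stack with a dict memo; return values are proved
-- equal on Pre_ (no argument is mutated by either program).

-- ===== PORT A =====
-- literal transliteration of Source A: dp table of (m+1) rows, prefix-sum array built by
-- index assignment, double loop filling dp[i][j]. Reads use pyGetD (Python indexing,
-- negative wrap exact); writes use pySetD (exact for the in-range indices reached on Pre_).
def max_sum_of_max_subarray (arr : List Int) (m : Int) (k : Int) : Int :=
  let n : Int := (arr.length : Int)
  let dp : List (List Int) :=
    (PySem.List.pyRange 0 (m + 1) 1).map (fun _ => List.replicate (n + 1).toNat (0 : Int))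
  let ps0 : List Int := List.replicate (n + 1).toNat (0 : Int)
  let ps : List Int :=
    (PySem.List.pyRange 1 (n + 1) 1).foldl
      (fun ps i =>
        PySem.List.pySetD ps i (PySem.List.pyGetD ps (i - 1) 0 + PySem.List.pyGetD arr (i - 1) 0))
      ps0
  let dp : List (List Int) :=
    (PySem.List.pyRange 1 (m + 1) 1).foldl
      (fun dp i =>
        (PySem.List.pyRange (i * k) (n + 1) 1).foldl
          (fun dp j =>
            let row := PySem.List.pyGetD dp i []
            let v := max (PySem.List.pyGetD row (j - 1) 0)
              (PySem.List.pyGetD (PySem.List.pyGetD dp (i - 1) []) (j - k) 0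
                + PySem.List.pyGetD ps j 0 - PySem.List.pyGetD ps (j - k) 0)
            PySem.List.pySetD dp i (PySem.List.pySetD row j v))
          dp)
      dp
  PySem.List.pyGetD (PySem.List.pyGetD dp m []) n 0

-- ===== PORT B =====
-- the while-loop of Source B: pop a frame; memo hit → skip; base case → memoize 0; a
-- dependency missing → re-push self and both children; else combine and memoize.
-- Fuel only makes the loop total; the proofs show the fuel passed below suffices.
def msLoop (k : Int) (ps : List Int) : Nat → List (Int × Int) → PySem.Dict (Int × Int) Int → PySem.Dict (Int × Int) Int
  | _, [], memo => memo
  | 0, _ :: _, memo => memo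
  | fuel + 1, (i, j) :: rest, memo =>
    if (memo.get? (i, j)).isSome then
      msLoop k ps fuel rest memo
    else if i ≤ 0 ∨ j < i * k then
      msLoop k ps fuel rest (memo.insert (i, j) 0)
    else
      match memo.get? (i, j - 1), memo.get? (i - 1, j - k) with
      | some a, some b =>
        let take := b + PySem.List.pyGetD ps j 0 - PySem.List.pyGetD ps (j - k) 0
        msLoop k ps fuel rest (memo.insert (i, j) (if a > take then a else take))
      | _, _ =>
        msLoop k ps fuel ((i - 1, j - k) :: (i, j - 1) :: (i, j) :: rest) memo

def max_sum_of_max_subarray_alt (arr : List Int) (m : Int) (k : Int) : Int :=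
  let n : Int := (arr.length : Int)
  let ps : List Int := arr.foldl (fun ps x => ps ++ [PySem.List.pyGetD ps (-1) 0 + x]) [0]
  let memo := msLoop k ps (4 ^ (m.toNat + arr.length + 2)) [(m, n)] PySem.Dict.empty
  memo.getD (m, n) 0

-- ===== PRECONDITION & SPEC =====
-- Pre_ is exactly the set of inputs on which the Python A returns normally:
-- A raises IndexError when m < 0 (dp[m] on a table with max(m+1,0) rows) and when
-- k < 0 with m ≥ 1 (prefix_sum[j-k] read past the end); no input A returns on is excluded.
def Pre_max_sum_of_max_subarray (arr : List Int) (m : Int) (k : Int) : Prop :=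
  0 ≤ m ∧ (0 ≤ k ∨ m = 0)
instance (arr : List Int) (m : Int) (k : Int) : Decidable (Pre_max_sum_of_max_subarray arr m k) := by unfold Pre_max_sum_of_max_subarray; infer_instance

def pvWitness_max_sum_of_max_subarray : List Int × Int × Int := ([1, -2, 3, 4], 2, 1)

def Spec_max_sum_of_max_subarray (arr : List Int) (m : Int) (k : Int) (out : Int) : Prop := out = max_sum_of_max_subarray_alt arr m k
instance (arr : List Int) (m : Int) (k : Int) (out : Int) : Decidable (Spec_max_sum_of_max_subarray arr m k out) := by unfold Spec_max_sum_of_max_subarray; infer_instance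

-- ===== CLAIM (what is proved, stated in full; the proofs are below) =====
def Claim_equal_max_sum_of_max_subarray : Prop := ∀ (arr : List Int) (m : Int) (k : Int), Dom_max_sum_of_max_subarray arr m k → Pre_max_sum_of_max_subarray arr m k → Spec_max_sum_of_max_subarray arr m k (max_sum_of_max_subarray arr m k)

-- ===== LEMMAS AND PROOFS =====

-- prefix sum of the first j elements, and the recurrence both programs compute:
-- msF arr k i j = best 0-floored sum of i non-overlapping length-k windows among
-- the first j elements.
def psum (arr : List Int) (j : Int) : Int := ((arr.take j.toNat).sum)

def msF (arr : List Int) (k : Int) (i : Int) (j : Int) : Int :=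
  if i ≤ 0 ∨ j < i * k ∨ j < 0 then 0
  else max (msF arr k i (j - 1)) (msF arr k (i - 1) (j - k) + psum arr j - psum arr (j - k))
termination_by (i.toNat, (j + 1).toNat)
decreasing_by
  · exact Prod.Lex.right _ (by omega)
  · exact Prod.Lex.left _ _ (by omega)

theorem msF_rec (arr : List Int) (k : Int) (i j : Int) (hi : 0 < i) (hjk : i * k ≤ j) (hj0 : 0 ≤ j) :
    msF arr k i j = max (msF arr k i (j - 1)) (msF arr k (i - 1) (j - k) + psum arr j - psum arr (j - k)) := by
  rw [msF, if_neg (by omega)]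

theorem msF_base (arr : List Int) (k : Int) (i j : Int) (h : i ≤ 0 ∨ j < i * k) :
    msF arr k i j = 0 := by
  rw [msF, if_pos (by tauto)]

theorem msF_neg (arr : List Int) (k : Int) (i j : Int) (h : j < 0) :
    msF arr k i j = 0 := by
  rw [msF, if_pos (Or.inr (Or.inr h))]

def psList (arr : List Int) : List Int :=
  (List.range (arr.length + 1)).map (fun t => (arr.take t).sum)

theorem psList_len (arr : List Int) : (psList arr).length = arr.length + 1 := by
  simp [psList]

theorem psList_getD (arr : List Int) (t : Int) (h0 : 0 ≤ t) (h1 : t ≤ (arr.length : Int)) :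
    PySem.List.pyGetD (psList arr) t 0 = psum arr t := by
  rw [PySem.List.pyGetD_eq_getElem _ _ h0 (by rw [psList_len]; omega)]
  simp [psList, psum]

theorem psList_append (arr : List Int) (x : Int) :
    psList (arr ++ [x]) = psList arr ++ [arr.sum + x] := by
  simp only [psList, List.length_append, List.length_singleton]
  rw [show arr.length + 1 + 1 = (arr.length + 1) + 1 from rfl, List.range_succ, List.map_append]
  congr 1
  · apply List.map_congr_left
    intro t ht
    simp only [List.mem_range] at ht
    rw [List.take_append_of_le_length (by omega)]
  · rw [List.map_singleton, List.take_of_length_le (by simp)]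
    simp

theorem psList_B (arr : List Int) :
    arr.foldl (fun ps x => ps ++ [PySem.List.pyGetD ps (-1) 0 + x]) [0] = psList arr := by
  induction arr using List.reverseRecOn with
  | nil => simp [psList]
  | append_singleton l x ih =>
    rw [List.foldl_append, List.foldl_cons, List.foldl_nil, ih, psList_append]
    congr 2
    have h : psList l = (List.range l.length).map (fun t => (l.take t).sum) ++ [(l.take l.length).sum] := by
      simp [psList, List.range_succ]
    rw [h, PySem.List.pyGetD_neg_one_append_singleton]
    rw [List.take_of_length_le (by omega)]

theorem psList_A (arr : List Int) :
    (PySem.List.pyRange 1 ((arr.length : Int) + 1) 1).foldl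
      (fun ps i =>
        PySem.List.pySetD ps i (PySem.List.pyGetD ps (i - 1) 0 + PySem.List.pyGetD arr (i - 1) 0))
      (List.replicate ((arr.length : Int) + 1).toNat (0 : Int)) = psList arr := by
  have key : ∀ (u : Nat), u ≤ arr.length →
      (PySem.List.pyRange 1 ((u : Int) + 1) 1).foldl
        (fun ps i =>
          PySem.List.pySetD ps i (PySem.List.pyGetD ps (i - 1) 0 + PySem.List.pyGetD arr (i - 1) 0))
        (List.replicate ((arr.length : Int) + 1).toNat (0 : Int))
      = (List.range (u + 1)).map (fun t => (arr.take t).sum) ++ List.replicate (arr.length - u) 0 := by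
    intro u hu
    induction u with
    | zero =>
      rw [PySem.List.pyRange_one_eq_nil (by omega), List.foldl_nil]
      have : ((arr.length : Int) + 1).toNat = arr.length + 1 := by omega
      rw [this]
      simp [List.replicate_succ]
    | succ u ih =>
      have hstep := ih (by omega)
      push_cast
      rw [PySem.List.pyRange_one_succ_right (by omega), List.foldl_append,
          hstep, List.foldl_cons, List.foldl_nil]
      have hlen1 : ((List.range (u + 1)).map (fun t => (arr.take t).sum)).length = u + 1 := by simp
      -- the two reads
      have hread1 : PySem.List.pyGetD
          ((List.range (u + 1)).map (fun t => (arr.take t).sum) ++ List.replicate (arr.length - u) 0)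
          (((u : Int) + 1) - 1) 0 = (arr.take u).sum := by
        rw [show ((u : Int) + 1) - 1 = ((u : Nat) : Int) by ring,
            PySem.List.pyGetD_natCast]
        rw [List.getD_append _ _ _ _ (by simp)]
        simp
      have hread2 : PySem.List.pyGetD arr (((u : Int) + 1) - 1) 0 = arr.getD u 0 := by
        rw [show ((u : Int) + 1) - 1 = ((u : Nat) : Int) by ring,
            PySem.List.pyGetD_natCast]
      rw [hread1, hread2]
      rw [show ((u : Int) + 1) = (((u + 1 : Nat)) : Int) by push_cast; ring,
          PySem.List.pySetD_natCast]
      -- now the set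
      rw [List.set_append_right _ _ (by omega)]
      have hrep : arr.length - u = (arr.length - (u + 1)) + 1 := by omega
      rw [hlen1, show u + 1 - (u + 1) = 0 from by omega, hrep, List.replicate_succ, List.set_cons_zero]
      rw [List.range_succ (n := u + 1), List.map_append]
      rw [List.append_assoc]
      congr 2
      rw [List.getD_eq_getElem _ _ (by omega)]
      show (List.take u arr).sum + arr[u] = (List.take (u + 1) arr).sum
      rw [List.sum_take_succ _ _ (by omega)]
      rfl
  have := key arr.length (le_refl _)
  simp only [Nat.sub_self, List.replicate_zero, List.append_nil] at this
  simpa [psList] using this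

-- ===== A-side table description =====

def rowL (arr : List Int) (k : Int) (r : Int) : List Int :=
  (List.range (arr.length + 1)).map (fun (t : Nat) => msF arr k r (t : Int))

def prow (arr : List Int) (k : Int) (i j : Int) : List Int :=
  (List.range (arr.length + 1)).map (fun (t : Nat) => if (t : Int) < j then msF arr k i (t : Int) else 0)

def stA (arr : List Int) (k : Int) (M : Nat) (i : Int) : List (List Int) :=
  (List.range M).map (fun (r : Nat) => if (r : Int) ≤ i then rowL arr k (r : Int) else List.replicate (arr.length + 1) 0)

def stP (arr : List Int) (k : Int) (M : Nat) (i j : Int) : List (List Int) :=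
  (List.range M).map (fun (r : Nat) =>
    if (r : Int) < i then rowL arr k (r : Int)
    else if (r : Int) = i then prow arr k i j
    else List.replicate (arr.length + 1) 0)

theorem set_map_range {α : Type} (N : Nat) (f : Nat → α) (u : Nat) (v : α) (hu : u < N) :
    ((List.range N).map f).set u v = (List.range N).map (fun t => if t = u then v else f t) := by
  apply List.ext_getElem
  · simp
  · intro t h1 h2
    simp only [List.getElem_set, List.getElem_map, List.getElem_range]
    simp only [List.length_set, List.length_map, List.length_range] at h1
    split <;> split <;> first | rfl | omega

theorem stA_zero (arr : List Int) (k : Int) (M : Nat) :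
    stA arr k M 0 = List.replicate M (List.replicate (arr.length + 1) 0) := by
  unfold stA
  have h : ∀ r ∈ List.range M, (if ((r : Nat) : Int) ≤ 0 then rowL arr k (r : Int) else List.replicate (arr.length + 1) 0)
      = List.replicate (arr.length + 1) (0 : Int) := by
    intro r _
    split
    · have hr : r = 0 := by omega
      subst hr
      unfold rowL
      apply List.ext_getElem
      · simp
      · intro t h1 h2
        simp [msF_base arr k 0 _ (Or.inl le_rfl)]
    · rfl
  rw [List.map_congr_left h]
  rw [List.map_const', List.length_range]

theorem stP_len (arr : List Int) (k : Int) (M : Nat) (i j : Int) : (stP arr k M i j).length = M := by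
  simp [stP]

theorem stP_get_i (arr : List Int) (k : Int) (M : Nat) (i j : Int) (h0 : 0 ≤ i) (h1 : i.toNat < M) :
    PySem.List.pyGetD (stP arr k M i j) i [] = prow arr k i j := by
  rw [PySem.List.pyGetD_eq_getElem _ _ h0 (by rw [stP_len]; omega)]
  simp only [stP, List.getElem_map, List.getElem_range]
  rw [if_neg (by omega), if_pos (by omega)]

theorem stP_get_pred (arr : List Int) (k : Int) (M : Nat) (i j : Int) (h0 : 1 ≤ i) (h1 : (i - 1).toNat < M) :
    PySem.List.pyGetD (stP arr k M i j) (i - 1) [] = rowL arr k (i - 1) := by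
  rw [PySem.List.pyGetD_eq_getElem _ _ (by omega) (by rw [stP_len]; omega)]
  simp only [stP, List.getElem_map, List.getElem_range]
  rw [if_pos (by omega)]
  congr 1
  omega

theorem rowL_getD (arr : List Int) (k : Int) (r : Int) (t : Int) (h0 : 0 ≤ t) (h1 : t ≤ (arr.length : Int)) :
    PySem.List.pyGetD (rowL arr k r) t 0 = msF arr k r t := by
  rw [PySem.List.pyGetD_eq_getElem _ _ h0 (by simp [rowL]; omega)]
  simp only [rowL, List.getElem_map, List.getElem_range]
  congr 1
  omega

theorem prow_getD (arr : List Int) (k : Int) (i j : Int) (t : Int) (h0 : 0 ≤ t) (h1 : t ≤ (arr.length : Int)) :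
    PySem.List.pyGetD (prow arr k i j) t 0 = if t < j then msF arr k i t else 0 := by
  rw [PySem.List.pyGetD_eq_getElem _ _ h0 (by simp [prow]; omega)]
  simp only [prow, List.getElem_map, List.getElem_range]
  have hc : ((t.toNat : Nat) : Int) = t := by omega
  rw [hc]

theorem prow_last (arr : List Int) (k : Int) (i j : Int) (h : j ≤ (arr.length : Int)) :
    PySem.List.pyGetD (prow arr k i j) (-1) 0 = 0 := by
  have hne : prow arr k i j ≠ [] := by simp [prow]
  rw [PySem.List.pyGetD_neg_one _ _ hne, List.getLast_eq_getElem]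
  simp only [prow, List.getElem_map, List.length_map, List.length_range, Nat.add_sub_cancel,
    List.getElem_range]
  rw [if_neg (by omega)]

theorem A_read_a (arr : List Int) (k : Int) (i j : Int) (hk : 0 ≤ k) (hi : 1 ≤ i)
    (hjk : i * k ≤ j) (hjn : j ≤ (arr.length : Int)) :
    PySem.List.pyGetD (prow arr k i j) (j - 1) 0 = msF arr k i (j - 1) := by
  have hj0 : (0 : Int) ≤ j := le_trans (mul_nonneg (by omega) hk) hjk
  by_cases hj1 : 1 ≤ j
  · rw [prow_getD arr k i j (j - 1) (by omega) (by omega), if_pos (by omega)]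
  · have hj : j = 0 := by omega
    subst hj
    rw [show (0 : Int) - 1 = -1 by ring, prow_last arr k i 0 (by omega),
        msF_neg arr k i (-1) (by omega)]

-- the dp[i][j] assignment step of A's inner loop
theorem A_step (arr : List Int) (k : Int) (M : Nat) (m i j : Int)
    (hk : 0 ≤ k) (hi : 1 ≤ i) (him : i ≤ m) (hM : M = (m + 1).toNat)
    (hjk : i * k ≤ j) (hjn : j ≤ (arr.length : Int)) :
    (PySem.List.pySetD (stP arr k M i j) i
      (PySem.List.pySetD (PySem.List.pyGetD (stP arr k M i j) i []) j
        (max (PySem.List.pyGetD (PySem.List.pyGetD (stP arr k M i j) i []) (j - 1) 0)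
          (PySem.List.pyGetD (PySem.List.pyGetD (stP arr k M i j) (i - 1) []) (j - k) 0
            + PySem.List.pyGetD (psList arr) j 0 - PySem.List.pyGetD (psList arr) (j - k) 0))))
    = stP arr k M i (j + 1) := by
  have hj0 : (0 : Int) ≤ j := le_trans (mul_nonneg (by omega) hk) hjk
  have hjk0 : (0 : Int) ≤ j - k := by
    have h2 : (0 : Int) ≤ (i - 1) * k := mul_nonneg (by omega) hk
    nlinarith
  have hiM : i.toNat < M := by omega
  rw [stP_get_i arr k M i j (by omega) hiM, stP_get_pred arr k M i j hi (by omega)]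
  rw [A_read_a arr k i j hk hi hjk hjn, rowL_getD arr k (i - 1) (j - k) hjk0 (by omega)]
  rw [psList_getD arr j hj0 hjn, psList_getD arr (j - k) hjk0 (by omega)]
  rw [← msF_rec arr k i j (by omega) hjk hj0]
  -- inner set: the partial row advances by one cell
  have hrow : PySem.List.pySetD (prow arr k i j) j (msF arr k i j) = prow arr k i (j + 1) := by
    rw [PySem.List.pySetD_of_nonneg _ _ hj0]
    unfold prow
    rw [set_map_range _ _ _ _ (by omega)]
    apply List.map_congr_left
    intro t ht
    simp only [List.mem_range] at ht
    by_cases h : t = j.toNat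
    · subst h
      rw [if_pos rfl, if_pos (by omega)]
      congr 1
      omega
    · rw [if_neg h]
      exact if_congr (by omega) rfl rfl
  rw [hrow]
  -- outer set: replace row i
  rw [PySem.List.pySetD_of_nonneg _ _ (by omega)]
  unfold stP
  rw [set_map_range _ _ _ _ hiM]
  apply List.map_congr_left
  intro r hr
  simp only [List.mem_range] at hr
  by_cases h : r = i.toNat
  · subst h
    rw [if_pos rfl, if_neg (by omega), if_pos (by omega)]
  · rw [if_neg h]
    by_cases h2 : (r : Int) < i
    · rw [if_pos h2, if_pos h2]
    · rw [if_neg h2, if_neg h2, if_neg (by omega), if_neg (by omega)]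

theorem stA_to_stP (arr : List Int) (k : Int) (M : Nat) (i : Int) (hi : 1 ≤ i) :
    stA arr k M (i - 1) = stP arr k M i (i * k) := by
  unfold stA stP
  apply List.map_congr_left
  intro r hr
  by_cases h1 : (r : Int) < i
  · rw [if_pos (by omega), if_pos h1]
  · rw [if_neg (by omega), if_neg h1]
    by_cases h2 : (r : Int) = i
    · rw [if_pos h2]
      apply List.ext_getElem (by simp [prow])
      intro t h1' h2'
      simp only [prow, List.getElem_map, List.getElem_range, List.getElem_replicate]
      split
      · rw [msF_base arr k i _ (Or.inr (by assumption))]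
      · rfl
    · rw [if_neg h2]

theorem stP_to_stA (arr : List Int) (k : Int) (M : Nat) (i J : Int)
    (h : (arr.length : Int) < J) :
    stP arr k M i J = stA arr k M i := by
  unfold stA stP
  apply List.map_congr_left
  intro r hr
  by_cases h1 : (r : Int) < i
  · rw [if_pos h1, if_pos (by omega)]
  · rw [if_neg h1]
    by_cases h2 : (r : Int) = i
    · rw [if_pos h2, if_pos (by omega)]
      unfold prow rowL
      apply List.map_congr_left
      intro t ht
      simp only [List.mem_range] at ht
      rw [if_pos (by omega), h2]
    · rw [if_neg h2, if_neg (by omega)]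

theorem A_inner (arr : List Int) (k : Int) (M : Nat) (m i : Int)
    (hk : 0 ≤ k) (hi : 1 ≤ i) (him : i ≤ m) (hM : M = (m + 1).toNat) :
    ∀ d : Nat, i * k + (d : Int) ≤ (arr.length : Int) + 1 →
    (PySem.List.pyRange (i * k) (i * k + (d : Int)) 1).foldl
      (fun dp j =>
        PySem.List.pySetD dp i
          (PySem.List.pySetD (PySem.List.pyGetD dp i []) j
            (max (PySem.List.pyGetD (PySem.List.pyGetD dp i []) (j - 1) 0)
              (PySem.List.pyGetD (PySem.List.pyGetD dp (i - 1) []) (j - k) 0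
                + PySem.List.pyGetD (psList arr) j 0 - PySem.List.pyGetD (psList arr) (j - k) 0))))
      (stP arr k M i (i * k))
    = stP arr k M i (i * k + (d : Int)) := by
  intro d
  induction d with
  | zero =>
    intro h
    rw [Nat.cast_zero, add_zero, PySem.List.pyRange_one_eq_nil le_rfl, List.foldl_nil]
  | succ d ih =>
    intro h
    rw [show ((d + 1 : Nat) : Int) = (d : Int) + 1 by push_cast; ring, ← add_assoc,
        PySem.List.pyRange_one_succ_right (by omega), List.foldl_append,
        ih (by omega), List.foldl_cons, List.foldl_nil]
    rw [A_step arr k M m i (i * k + (d : Int)) hk hi him hM (by omega) (by omega)]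

theorem A_outer (arr : List Int) (k : Int) (m : Int) (hk : 0 ≤ k) (hm : 0 ≤ m) :
    ∀ u : Nat, (u : Int) ≤ m →
    (PySem.List.pyRange 1 ((u : Int) + 1) 1).foldl
      (fun dp i =>
        (PySem.List.pyRange (i * k) ((arr.length : Int) + 1) 1).foldl
          (fun dp j =>
            PySem.List.pySetD dp i
              (PySem.List.pySetD (PySem.List.pyGetD dp i []) j
                (max (PySem.List.pyGetD (PySem.List.pyGetD dp i []) (j - 1) 0)
                  (PySem.List.pyGetD (PySem.List.pyGetD dp (i - 1) []) (j - k) 0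
                    + PySem.List.pyGetD (psList arr) j 0 - PySem.List.pyGetD (psList arr) (j - k) 0))))
          dp)
      (stA arr k (m + 1).toNat 0)
    = stA arr k (m + 1).toNat (u : Int) := by
  intro u
  induction u with
  | zero =>
    intro h
    rw [Nat.cast_zero, zero_add, PySem.List.pyRange_one_eq_nil le_rfl, List.foldl_nil]
  | succ u ih =>
    intro h
    push_cast
    push_cast at h
    rw [PySem.List.pyRange_one_succ_right (by omega), List.foldl_append,
        ih (by omega), List.foldl_cons, List.foldl_nil]
    have hstart := stA_to_stP arr k (m + 1).toNat ((u : Int) + 1) (by omega)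
    rw [show ((u : Int) + 1 - 1) = (u : Int) by ring] at hstart
    by_cases hcase : ((u : Int) + 1) * k ≤ (arr.length : Int) + 1
    · have hd : ((arr.length : Int) + 1 - ((u : Int) + 1) * k).toNat = ((arr.length : Int) + 1 - ((u : Int) + 1) * k) := by omega
      rw [show (arr.length : Int) + 1 = ((u : Int) + 1) * k + ((((arr.length : Int) + 1 - ((u : Int) + 1) * k).toNat : Nat) : Int) by omega]
      rw [hstart]
      rw [A_inner arr k (m + 1).toNat m ((u : Int) + 1) hk (by omega) (by omega) rfl _ (by omega)]
      rw [stP_to_stA arr k (m + 1).toNat ((u : Int) + 1) _ (by omega)]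
    · rw [PySem.List.pyRange_one_eq_nil (by omega), List.foldl_nil, hstart,
          stP_to_stA arr k (m + 1).toNat ((u : Int) + 1) _ (by omega)]

theorem A_init (arr : List Int) (k : Int) (m : Int) (hm : 0 ≤ m) :
    (PySem.List.pyRange 0 (m + 1) 1).map (fun _ => List.replicate (((arr.length : Int)) + 1).toNat (0 : Int))
      = stA arr k (m + 1).toNat 0 := by
  have h1 : ((arr.length : Int) + 1).toNat = arr.length + 1 := by omega
  rw [stA_zero, h1, List.map_const', PySem.List.length_pyRange_one,
      show m + 1 - 0 = m + 1 by ring]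

theorem A_final (arr : List Int) (k : Int) (m : Int) (hm : 0 ≤ m) :
    PySem.List.pyGetD (PySem.List.pyGetD (stA arr k (m + 1).toNat m) m []) (arr.length : Int) 0
      = msF arr k m (arr.length : Int) := by
  have h1 : PySem.List.pyGetD (stA arr k (m + 1).toNat m) m [] = rowL arr k m := by
    rw [PySem.List.pyGetD_eq_getElem _ _ hm (by simp only [stA, List.length_map, List.length_range]; omega)]
    simp only [stA, List.getElem_map, List.getElem_range]
    rw [if_pos (by omega)]
    congr 1
    omega
  rw [h1, rowL_getD arr k m _ (by omega) le_rfl]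

theorem max_sum_of_max_subarray_A_eq (arr : List Int) (m k : Int)
    (hm : 0 ≤ m) (hk : 0 ≤ k ∨ m = 0) :
    max_sum_of_max_subarray arr m k = msF arr k m (arr.length : Int) := by
  show PySem.List.pyGetD
    (PySem.List.pyGetD
      ((PySem.List.pyRange 1 (m + 1) 1).foldl
        (fun dp i =>
          (PySem.List.pyRange (i * k) ((arr.length : Int) + 1) 1).foldl
            (fun dp j =>
              PySem.List.pySetD dp i
                (PySem.List.pySetD (PySem.List.pyGetD dp i []) j
                  (max (PySem.List.pyGetD (PySem.List.pyGetD dp i []) (j - 1) 0)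
                    (PySem.List.pyGetD (PySem.List.pyGetD dp (i - 1) []) (j - k) 0
                      + PySem.List.pyGetD
                          ((PySem.List.pyRange 1 ((arr.length : Int) + 1) 1).foldl
                            (fun ps i =>
                              PySem.List.pySetD ps i
                                (PySem.List.pyGetD ps (i - 1) 0 + PySem.List.pyGetD arr (i - 1) 0))
                            (List.replicate ((arr.length : Int) + 1).toNat (0 : Int))) j 0
                      - PySem.List.pyGetD
                          ((PySem.List.pyRange 1 ((arr.length : Int) + 1) 1).foldl
                            (fun ps i =>
                              PySem.List.pySetD ps i
                                (PySem.List.pyGetD ps (i - 1) 0 + PySem.List.pyGetD arr (i - 1) 0))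
                            (List.replicate ((arr.length : Int) + 1).toNat (0 : Int))) (j - k) 0))))
            dp)
        ((PySem.List.pyRange 0 (m + 1) 1).map
          (fun _ => List.replicate (((arr.length : Int)) + 1).toNat (0 : Int))))
      m [])
    (arr.length : Int) 0 = msF arr k m (arr.length : Int)
  rw [psList_A, A_init arr k m hm]
  rcases hk with hk0 | hm0
  · have houter := A_outer arr k m hk0 hm m.toNat (by omega)
    rw [show ((m.toNat : Nat) : Int) = m by omega] at houter
    rw [houter]
    exact A_final arr k m hm
  · subst hm0
    rw [show (0 : Int) + 1 = 1 by ring, PySem.List.pyRange_one_eq_nil le_rfl, List.foldl_nil]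
    exact A_final arr k 0 hm

def msCorrect (arr : List Int) (k : Int) (memo : PySem.Dict (Int × Int) Int) : Prop :=
  ∀ i j v, memo.get? (i, j) = some v → v = msF arr k i j

-- one pop of a frame whose two dependencies are already memoized
theorem msLoop_pop_ready (arr : List Int) (k : Int) (hk : 0 ≤ k) (i j : Int)
    (hi : 0 < i) (hjk : i * k ≤ j) (hj : j ≤ (arr.length : Int))
    (rest : List (Int × Int)) (memo : PySem.Dict (Int × Int) Int) (f : Nat)
    (hC : msCorrect arr k memo)
    (hc1 : memo.get? (i, j - 1) = some (msF arr k i (j - 1)))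
    (hc2 : memo.get? (i - 1, j - k) = some (msF arr k (i - 1) (j - k))) :
    ∃ memo', msCorrect arr k memo' ∧
      (∀ p v, memo.get? p = some v → memo'.get? p = some v) ∧
      memo'.get? (i, j) = some (msF arr k i j) ∧
      msLoop k (psList arr) (f + 1) ((i, j) :: rest) memo = msLoop k (psList arr) f rest memo' := by
  have hj0 : (0 : Int) ≤ j := le_trans (mul_nonneg (by omega) hk) hjk
  have hjk0 : (0 : Int) ≤ j - k := by
    have : (i - 1) * k ≤ j - k := by nlinarith
    have h2 : (0 : Int) ≤ (i - 1) * k := mul_nonneg (by omega) hk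
    omega
  by_cases hmem : (memo.get? (i, j)).isSome
  · obtain ⟨v, hv⟩ := Option.isSome_iff_exists.mp hmem
    refine ⟨memo, hC, fun p v h => h, ?_, ?_⟩
    · rw [hv, hC i j v hv]
    · rw [msLoop, if_pos hmem]
  · have hnone : memo.get? (i, j) = none := Option.not_isSome_iff_eq_none.mp hmem
    have hval : (if msF arr k i (j - 1) > msF arr k (i - 1) (j - k) + psum arr j - psum arr (j - k)
        then msF arr k i (j - 1)
        else msF arr k (i - 1) (j - k) + psum arr j - psum arr (j - k)) = msF arr k i j := by
      rw [msF_rec arr k i j hi hjk hj0]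
      by_cases h : msF arr k i (j - 1) ≤ msF arr k (i - 1) (j - k) + psum arr j - psum arr (j - k)
      · rw [if_neg (by omega), max_eq_right h]
      · rw [if_pos (by omega), max_eq_left (by omega)]
    refine ⟨memo.insert (i, j) (msF arr k i j), ?_, ?_, ?_, ?_⟩
    · intro i' j' v h
      rw [PySem.Dict.get?_insert] at h
      split at h
      · rename_i heq
        cases heq
        exact (Option.some_inj.mp h).symm ▸ rfl
      · exact hC i' j' v h
    · intro p v h
      rw [PySem.Dict.get?_insert]
      split
      · rename_i heq
        subst heq
        rw [hnone] at h
        cases h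
      · exact h
    · rw [PySem.Dict.get?_insert, if_pos rfl]
    · rw [msLoop, if_neg hmem, if_neg (by omega), hc1, hc2]
      rw [psList_getD arr j hj0 hj, psList_getD arr (j - k) hjk0 (by omega)]
      dsimp only
      rw [hval]

theorem msLoop_sim (arr : List Int) (k : Int) (hk : 0 ≤ k) :
    ∀ (N : Nat), ∀ (i j : Int), i.toNat + (j + 1).toNat < N → j ≤ (arr.length : Int) →
    ∀ (rest : List (Int × Int)) (memo : PySem.Dict (Int × Int) Int) (fuel : Nat),
      4 ^ (i.toNat + (j + 1).toNat) ≤ fuel →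
      msCorrect arr k memo →
      ∃ memo' fuel',
        msCorrect arr k memo' ∧
        (∀ p v, memo.get? p = some v → memo'.get? p = some v) ∧
        memo'.get? (i, j) = some (msF arr k i j) ∧
        fuel - 4 ^ (i.toNat + (j + 1).toNat) ≤ fuel' ∧
        msLoop k (psList arr) fuel ((i, j) :: rest) memo = msLoop k (psList arr) fuel' rest memo' := by
  intro N
  induction N with
  | zero => intro i j h; omega
  | succ N ih =>
    intro i j hN hj rest memo fuel hfuel hC
    have hpow1 : 1 ≤ 4 ^ (i.toNat + (j + 1).toNat) := Nat.one_le_pow _ _ (by norm_num)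
    obtain ⟨f, rfl⟩ : ∃ f, fuel = f + 1 := ⟨fuel - 1, by omega⟩
    by_cases hmem : (memo.get? (i, j)).isSome
    · obtain ⟨v, hv⟩ := Option.isSome_iff_exists.mp hmem
      refine ⟨memo, f, hC, fun p v h => h, ?_, by omega, ?_⟩
      · rw [hv, hC i j v hv]
      · rw [msLoop, if_pos hmem]
    · have hnone : memo.get? (i, j) = none := Option.not_isSome_iff_eq_none.mp hmem
      by_cases hbase : i ≤ 0 ∨ j < i * k
      · refine ⟨memo.insert (i, j) 0, f, ?_, ?_, ?_, by omega, ?_⟩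
        · intro i' j' v h
          rw [PySem.Dict.get?_insert] at h
          split at h
          · rename_i heq
            cases heq
            rw [msF_base arr k i j hbase]
            exact (Option.some_inj.mp h).symm
          · exact hC i' j' v h
        · intro p v h
          rw [PySem.Dict.get?_insert]
          split
          · rename_i heq
            subst heq
            rw [hnone] at h
            cases h
          · exact h
        · rw [PySem.Dict.get?_insert, if_pos rfl, msF_base arr k i j hbase]
        · rw [msLoop, if_neg hmem, if_pos hbase]
      · have hi : 0 < i := by omega
        have hjk : i * k ≤ j := by omega
        have hj0 : (0 : Int) ≤ j := le_trans (mul_nonneg (by omega) hk) hjk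
        set μ := i.toNat + (j + 1).toNat with hμ
        have hμ1 : i.toNat + (j - 1 + 1).toNat < μ := by omega
        have hμ2 : (i - 1).toNat + (j - k + 1).toNat < μ := by omega
        have hmono1 : 4 ^ (i.toNat + (j - 1 + 1).toNat) ≤ 4 ^ (μ - 1) :=
          Nat.pow_le_pow_right (by norm_num) (by omega)
        have hmono2 : 4 ^ ((i - 1).toNat + (j - k + 1).toNat) ≤ 4 ^ (μ - 1) :=
          Nat.pow_le_pow_right (by norm_num) (by omega)
        have hsucc : 4 ^ μ = 4 * 4 ^ (μ - 1) := by
          rw [← Nat.pow_succ']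
          congr 1
          omega
        have hpm1 : 1 ≤ 4 ^ (μ - 1) := Nat.one_le_pow _ _ (by norm_num)
        by_cases hdep : (memo.get? (i, j - 1)).isSome ∧ (memo.get? (i - 1, j - k)).isSome
        · obtain ⟨ha, hb⟩ := hdep
          obtain ⟨a, ha⟩ := Option.isSome_iff_exists.mp ha
          obtain ⟨b, hb⟩ := Option.isSome_iff_exists.mp hb
          have ha' : memo.get? (i, j - 1) = some (msF arr k i (j - 1)) := by
            rw [ha, hC _ _ _ ha]
          have hb' : memo.get? (i - 1, j - k) = some (msF arr k (i - 1) (j - k)) := by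
            rw [hb, hC _ _ _ hb]
          obtain ⟨memo', hC', hmono', hget, heq⟩ :=
            msLoop_pop_ready arr k hk i j hi hjk hj rest memo f hC ha' hb'
          exact ⟨memo', f, hC', hmono', hget, by omega, heq⟩
        · have hpush : msLoop k (psList arr) (f + 1) ((i, j) :: rest) memo
              = msLoop k (psList arr) f ((i - 1, j - k) :: (i, j - 1) :: (i, j) :: rest) memo := by
            rw [msLoop, if_neg hmem, if_neg (by omega)]
            rcases h1 : memo.get? (i, j - 1) with _ | a <;>
              rcases h2 : memo.get? (i - 1, j - k) with _ | b
            · rfl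
            · rfl
            · rfl
            · exact absurd ⟨by rw [h1]; rfl, by rw [h2]; rfl⟩ hdep
          rw [hpush]
          obtain ⟨memo1, fuel1, hC1, hmono1', hget2, hf1, heq1⟩ :=
            ih (i - 1) (j - k) (by omega) (by omega) ((i, j - 1) :: (i, j) :: rest) memo f
              (by omega) hC
          rw [heq1]
          obtain ⟨memo2, fuel2, hC2, hmono2', hget1, hf2, heq2⟩ :=
            ih i (j - 1) (by omega) (by omega) ((i, j) :: rest) memo1 fuel1 (by omega) hC1
          rw [heq2]
          have hget2' := hmono2' _ _ hget2
          obtain ⟨f2, rfl⟩ : ∃ x, fuel2 = x + 1 := ⟨fuel2 - 1, by omega⟩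
          obtain ⟨memo', hC', hmono3, hget, heq3⟩ :=
            msLoop_pop_ready arr k hk i j hi hjk hj rest memo2 f2 hC2 hget1 hget2'
          refine ⟨memo', f2, hC', ?_, hget, by omega, heq3⟩
          intro p v h
          exact hmono3 _ _ (hmono2' _ _ (hmono1' _ _ h))

theorem msLoop_nil (k : Int) (ps : List Int) (fuel : Nat) (memo : PySem.Dict (Int × Int) Int) :
    msLoop k ps fuel [] memo = memo := by
  cases fuel <;> rfl

theorem msEmpty_correct (arr : List Int) (k : Int) : msCorrect arr k PySem.Dict.empty := by
  intro i j v h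
  rw [PySem.Dict.get?_empty] at h
  cases h

theorem max_sum_of_max_subarray_B_eq (arr : List Int) (m k : Int)
    (hm : 0 ≤ m) (hk : 0 ≤ k ∨ m = 0) :
    max_sum_of_max_subarray_alt arr m k = msF arr k m (arr.length : Int) := by
  show (msLoop k (arr.foldl (fun ps x => ps ++ [PySem.List.pyGetD ps (-1) 0 + x]) [0])
      (4 ^ (m.toNat + arr.length + 2)) [(m, (arr.length : Int))] PySem.Dict.empty).getD
      (m, (arr.length : Int)) 0 = msF arr k m (arr.length : Int)
  rw [psList_B]
  rcases hk with hk | hm0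
  · have hexp : m.toNat + (((arr.length : Int)) + 1).toNat = m.toNat + arr.length + 1 := by omega
    obtain ⟨memo', fuel', hC', hmono', hget, hf', heq⟩ :=
      msLoop_sim arr k hk (m.toNat + arr.length + 2) m (arr.length : Int) (by omega) (by omega)
        [] PySem.Dict.empty (4 ^ (m.toNat + arr.length + 2))
        (by rw [hexp]; exact Nat.pow_le_pow_right (by norm_num) (by omega))
        (msEmpty_correct arr k)
    rw [heq, msLoop_nil]
    exact PySem.Dict.getD_of_get?_eq_some _ _ hget
  · subst hm0
    obtain ⟨f, hf⟩ : ∃ f, 4 ^ ((0 : Int).toNat + arr.length + 2) = f + 1 :=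
      ⟨4 ^ ((0 : Int).toNat + arr.length + 2) - 1, by
        have := Nat.one_le_pow ((0 : Int).toNat + arr.length + 2) 4 (by norm_num)
        omega⟩
    rw [hf, msLoop, if_neg (by rw [PySem.Dict.get?_empty]; simp), if_pos (Or.inl le_rfl),
        msLoop_nil, msF_base arr k 0 _ (Or.inl le_rfl)]
    rw [PySem.Dict.getD_of_get?_eq_some _ _ (by rw [PySem.Dict.get?_insert, if_pos rfl])]

-- ===== VERDICT (by name: the statement is the Claim_ definition above) =====
theorem max_sum_of_max_subarray_spec : Claim_equal_max_sum_of_max_subarray := by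
  intro arr m k _ hpre
  unfold Spec_max_sum_of_max_subarray
  rw [max_sum_of_max_subarray_A_eq arr m k hpre.1 hpre.2,
      max_sum_of_max_subarray_B_eq arr m k hpre.1 hpre.2]
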